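-- pv_equiv track=rewrite | github.com/pranaldongare/RSP_Education_App_V2 | backend/services/parent_dashboard_service.py | _make_parent_friendly
-- ===== SOURCE A (Python) =====
-- def _make_parent_friendly(description: str) -> str:
--     """Convert technical descriptions to parent-friendly language"""
--     replacements = {
--         "engagement score": "interest level",
--         "completion rate": "how much they finish",
--         "learning velocity": "learning speed",
--         "performance metrics": "how well they're doing",
--         "cognitive load": "mental effort required",
--         "retention rate": "how much they remember"
--     }
--
--     result = description
--     for technical, friendly in replacements.items():
--         result = result.replace(technical, friendly)
--
--     return result
-- ===== SOURCE B (Python) =====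
-- def _make_parent_friendly(description: str) -> str:
--     """Convert technical descriptions to parent-friendly language"""
--     replacements = [
--         ("engagement score", "interest level"),
--         ("completion rate", "how much they finish"),
--         ("learning velocity", "learning speed"),
--         ("performance metrics", "how well they're doing"),
--         ("cognitive load", "mental effort required"),
--         ("retention rate", "how much they remember"),
--     ]
--
--     def rewrite(text, pairs):
--         if not pairs:
--             return text
--         technical, friendly = pairs[0]
--         return rewrite(friendly.join(text.split(technical)), pairs[1:])
--
--     return rewrite(description, replacements)
-- ===== Notes on version B (the rewrite author's own statement) =====
-- stated objective: alternative
-- what changed: Each replacement pass is done by splitting the string on the technical phrase and joining the pieces with the friendly text, recursing over the pair list, instead of A's dict loop of str.replace calls; the cascade is kept because earlier replacements can interact with later keys, so a single-pass rewrite would not be exact.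
import Mathlib
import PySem

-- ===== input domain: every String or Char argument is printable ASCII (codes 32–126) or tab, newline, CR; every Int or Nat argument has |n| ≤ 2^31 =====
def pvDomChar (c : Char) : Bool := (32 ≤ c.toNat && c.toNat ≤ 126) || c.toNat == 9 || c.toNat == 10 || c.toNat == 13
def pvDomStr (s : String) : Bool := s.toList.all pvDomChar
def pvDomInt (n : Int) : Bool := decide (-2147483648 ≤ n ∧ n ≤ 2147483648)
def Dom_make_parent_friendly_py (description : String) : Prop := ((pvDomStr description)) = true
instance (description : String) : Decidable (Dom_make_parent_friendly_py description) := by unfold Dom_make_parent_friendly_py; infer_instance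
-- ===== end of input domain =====

-- B replaces each technical phrase by split-on-phrase + join-with-friendly-text, recursing
-- over the pair list, instead of A's dict loop of str.replace passes (objective: alternative).


-- ===== PORT A =====
def make_parent_friendly_py (description : String) : String :=
  let replacements : List (String × String) :=
    [("engagement score", "interest level"),
     ("completion rate", "how much they finish"),
     ("learning velocity", "learning speed"),
     ("performance metrics", "how well they're doing"),
     ("cognitive load", "mental effort required"),
     ("retention rate", "how much they remember")]
  replacements.foldl (fun result p => PySem.Str.replace result p.1 p.2) description

-- ===== PORT B =====
-- Source B's inner recursive 'rewrite(text, pairs)'; text.split(sep)/friendly.join worked on the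
-- List Char side (PySem.Chars.splitOn is exactly Python's str.split for a nonempty separator).
def pvRewrite : List Char → List (List Char × List Char) → List Char
  | text, [] => text
  | text, (technical, friendly) :: rest =>
      pvRewrite (PySem.Chars.join friendly (PySem.Chars.splitOn text technical)) rest

def make_parent_friendly_py_alt (description : String) : String :=
  String.ofList (pvRewrite description.toList
    [("engagement score".toList, "interest level".toList),
     ("completion rate".toList, "how much they finish".toList),
     ("learning velocity".toList, "learning speed".toList),
     ("performance metrics".toList, "how well they're doing".toList),
     ("cognitive load".toList, "mental effort required".toList),
     ("retention rate".toList, "how much they remember".toList)])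

-- ===== PRECONDITION & SPEC =====
def Spec_make_parent_friendly_py (description : String) (out : String) : Prop := out = make_parent_friendly_py_alt description
instance (description : String) (out : String) : Decidable (Spec_make_parent_friendly_py description out) := by unfold Spec_make_parent_friendly_py; infer_instance

-- ===== CLAIM (what is proved, stated in full; the proofs are below) =====
def Claim_equal_make_parent_friendly_py : Prop := ∀ (description : String), Dom_make_parent_friendly_py description → Spec_make_parent_friendly_py description (make_parent_friendly_py description)

-- ===== LEMMAS AND PROOFS =====

-- replace.go's accumulator comes out in front
lemma pv_rep_go_acc (old nw : List Char) : ∀ (fuel : Nat) (l acc : List Char),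
    PySem.Chars.replace.go old nw fuel l acc = acc.reverse ++ PySem.Chars.replace.go old nw fuel l [] := by
  intro fuel
  induction fuel with
  | zero => intro l acc; simp [PySem.Chars.replace.go]
  | succ f ih =>
    intro l acc
    cases l with
    | nil => simp [PySem.Chars.replace.go]
    | cons c t =>
      rw [PySem.Chars.replace.go, PySem.Chars.replace.go]
      split
      · rw [ih _ (nw.reverse ++ acc), ih _ (nw.reverse ++ [])]
        simp
      · rw [ih _ (c :: acc), ih _ [c]]
        simp

-- splitOn.go always produces at least one piece
lemma pv_split_go_ne_nil (sep : List Char) : ∀ (fuel : Nat) (l cur : List Char) (acc : List (List Char)),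
    PySem.Chars.splitOn.go sep fuel l cur acc ≠ [] := by
  intro fuel
  induction fuel with
  | zero => intro l cur acc; simp [PySem.Chars.splitOn.go]
  | succ f ih =>
    intro l cur acc
    cases l with
    | nil => simp [PySem.Chars.splitOn.go]
    | cons c t =>
      rw [PySem.Chars.splitOn.go]
      split
      · exact ih _ _ _
      · exact ih _ _ _

-- splitOn.go's accumulator holds the already finished pieces, in front
lemma pv_split_go_acc (sep : List Char) : ∀ (fuel : Nat) (l cur : List Char) (acc : List (List Char)),
    PySem.Chars.splitOn.go sep fuel l cur acc = acc.reverse ++ PySem.Chars.splitOn.go sep fuel l cur [] := by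
  intro fuel
  induction fuel with
  | zero => intro l cur acc; simp [PySem.Chars.splitOn.go]
  | succ f ih =>
    intro l cur acc
    cases l with
    | nil => simp [PySem.Chars.splitOn.go]
    | cons c t =>
      rw [PySem.Chars.splitOn.go, PySem.Chars.splitOn.go]
      split
      · rw [ih _ _ (cur.reverse :: acc), ih _ _ (cur.reverse :: [])]
        simp
      · rw [ih _ _ acc]

-- the two scanners agree: joining splitOn's pieces with `nw` is replace's scan
lemma pv_main_go (old nw : List Char) (hold : old ≠ []) :
    ∀ (fuel1 : Nat) (fuel2 : Nat) (l cur : List Char), l.length ≤ fuel1 → l.length ≤ fuel2 →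
    PySem.Chars.join nw (PySem.Chars.splitOn.go old fuel1 l cur []) =
      cur.reverse ++ PySem.Chars.replace.go old nw fuel2 l [] := by
  intro fuel1
  induction fuel1 with
  | zero =>
    intro fuel2 l cur h1 h2
    have : l = [] := by cases l <;> simp_all
    subst this
    cases fuel2 with
    | zero => simp [PySem.Chars.splitOn.go, PySem.Chars.replace.go, PySem.Chars.join_singleton]
    | succ f => simp [PySem.Chars.splitOn.go, PySem.Chars.replace.go, PySem.Chars.join_singleton]
  | succ f1 ih =>
    intro fuel2 l cur h1 h2
    cases l with
    | nil =>
      cases fuel2 with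
      | zero => simp [PySem.Chars.splitOn.go, PySem.Chars.replace.go, PySem.Chars.join_singleton]
      | succ f => simp [PySem.Chars.splitOn.go, PySem.Chars.replace.go, PySem.Chars.join_singleton]
    | cons c t =>
      cases fuel2 with
      | zero => simp at h2
      | succ f2 =>
        rw [PySem.Chars.splitOn.go, PySem.Chars.replace.go]
        have holdlen : 1 ≤ old.length := by cases old <;> simp_all
        split
        · rename_i hpre
          have hL : (List.drop old.length (c :: t)).length = t.length + 1 - old.length := by
            simp [List.length_drop]
          have h1' : t.length + 1 ≤ f1 + 1 := h1
          have h2'' : t.length + 1 ≤ f2 + 1 := h2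
          have hdroplen : (List.drop old.length (c :: t)).length ≤ f1 := by rw [hL]; omega
          have hdroplen2 : (List.drop old.length (c :: t)).length ≤ f2 := by rw [hL]; omega
          rw [pv_split_go_acc old f1 _ [] [cur.reverse]]
          obtain ⟨r0, rt, hr⟩ : ∃ r0 rt, PySem.Chars.splitOn.go old f1 (List.drop old.length (c :: t)) [] [] = r0 :: rt := by
            rcases h : PySem.Chars.splitOn.go old f1 (List.drop old.length (c :: t)) [] [] with _ | ⟨r0, rt⟩
            · exact absurd h (pv_split_go_ne_nil old _ _ _ _)
            · exact ⟨r0, rt, rfl⟩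
          rw [hr]
          have := ih f2 (List.drop old.length (c :: t)) [] hdroplen hdroplen2
          rw [hr] at this
          simp only [List.reverse_nil, List.nil_append] at this
          rw [show [cur.reverse].reverse ++ r0 :: rt = cur.reverse :: r0 :: rt by simp]
          rw [PySem.Chars.join_cons_cons, this]
          rw [pv_rep_go_acc old nw f2 _ (nw.reverse ++ [])]
          simp
        · have : t.length ≤ f1 := by simp at h1; omega
          have h2' : t.length ≤ f2 := by simp at h2; omega
          rw [ih f2 t (c :: cur) this h2']
          rw [pv_rep_go_acc old nw f2 t [c]]
          simp

-- one pass of B equals one pass of A (Python: nw.join(s.split(old)) == s.replace(old, nw), old ≠ "")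
lemma pv_join_splitOn_eq_replace (s old nw : List Char) (hold : old ≠ []) :
    PySem.Chars.join nw (PySem.Chars.splitOn s old) = PySem.Chars.replace s old nw := by
  have hemp : old.isEmpty = false := by cases old <;> simp_all
  rw [PySem.Chars.splitOn]
  rw [show PySem.Chars.replace s old nw = PySem.Chars.replace.go old nw s.length s [] by
    simp [PySem.Chars.replace, hemp]]
  have := pv_main_go old nw hold (s.length + 1) s.length s [] (by omega) le_rfl
  simpa using this

-- ===== VERDICT (by name: the statement is the Claim_ definition above) =====
theorem make_parent_friendly_py_spec : Claim_equal_make_parent_friendly_py := by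
  intro description _
  unfold Spec_make_parent_friendly_py
  unfold make_parent_friendly_py make_parent_friendly_py_alt
  simp only [List.foldl, pvRewrite]
  rw [pv_join_splitOn_eq_replace _ _ _ (by decide),
      pv_join_splitOn_eq_replace _ _ _ (by decide),
      pv_join_splitOn_eq_replace _ _ _ (by decide),
      pv_join_splitOn_eq_replace _ _ _ (by decide),
      pv_join_splitOn_eq_replace _ _ _ (by decide),
      pv_join_splitOn_eq_replace _ _ _ (by decide)]
  have h : (PySem.Str.replace
      (PySem.Str.replace
        (PySem.Str.replace
          (PySem.Str.replace
            (PySem.Str.replace (PySem.Str.replace description "engagement score" "interest level") "completion rate"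
              "how much they finish")
            "learning velocity" "learning speed")
          "performance metrics" "how well they're doing")
        "cognitive load" "mental effort required")
      "retention rate" "how much they remember").toList =
      PySem.Chars.replace
        (PySem.Chars.replace
          (PySem.Chars.replace
            (PySem.Chars.replace
              (PySem.Chars.replace
                (PySem.Chars.replace description.toList
                  "engagement score".toList "interest level".toList)
                "completion rate".toList "how much they finish".toList)
              "learning velocity".toList "learning speed".toList)
            "performance metrics".toList "how well they're doing".toList)
          "cognitive load".toList "mental effort required".toList)
        "retention rate".toList "how much they remember".toList := by
    simp [PySem.Str.toList_replace]
  conv_lhs => rw [← String.ofList_toList (s := PySem.Str.replace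
      (PySem.Str.replace
        (PySem.Str.replace
          (PySem.Str.replace
            (PySem.Str.replace (PySem.Str.replace description "engagement score" "interest level") "completion rate"
              "how much they finish")
            "learning velocity" "learning speed")
          "performance metrics" "how well they're doing")
        "cognitive load" "mental effort required")
      "retention rate" "how much they remember")]
  exact congrArg String.ofList h
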